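-- pv_equiv track=rewrite | github.com/lijahong/Python_Algoritm | 프로그래머스_이모티콘할인행사.py | setting
-- ===== SOURCE A (Python) =====
-- def setting(users,currentsale,emoticons):
--     allmoney = 0
--     allpeople = 0
--     for i in users:
--         moneycount = 0
--         for j in range(len(currentsale)):
--             if i[0] <= currentsale[j]:
--                 moneycount += (emoticons[j] * (100 - currentsale[j]))//100
--
--         if moneycount < i[1]:
--             allmoney += moneycount
--         else:
--             allpeople += 1
--     return allpeople,allmoney
-- ===== SOURCE B (Python) =====
-- def setting(users, currentsale, emoticons):
--     # sort (sale, price) pairs by sale ascending, prefix-sum the discounted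
--     # prices of the reversed list, and binary-search each user's threshold
--     pairs = sorted(((currentsale[j], emoticons[j]) for j in range(len(currentsale))),
--                    key=lambda p: p[0])
--     n = len(pairs)
--     sales = [p[0] for p in pairs]
--     prefix = [0]
--     run = 0
--     for s, e in reversed(pairs):
--         run += (e * (100 - s)) // 100
--         prefix.append(run)
--     allmoney = 0
--     allpeople = 0
--     for threshold, budget in users:
--         # leftmost index with sales[idx] >= threshold (textbook bisect_left)
--         lo, hi = 0, n
--         while lo < hi:
--             mid = (lo + hi) // 2
--             if sales[mid] < threshold:
--                 lo = mid + 1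
--             else:
--                 hi = mid
--         moneycount = prefix[n - lo]
--         if moneycount < budget:
--             allmoney += moneycount
--         else:
--             allpeople += 1
--     return allpeople, allmoney
-- ===== Notes on version B (the rewrite author's own statement) =====
-- stated objective: faster
-- what changed: Instead of re-scanning every emoticon for every user, B sorts the (sale, price) pairs once, prefix-sums the floored discounted prices, and answers each user's threshold with a binary search, so the per-user work drops from O(E) to O(log E).
-- outside the precondition, e.g. on setting([(50, 10)], [10, 20], [20]): A returns (0, 0), B raises IndexError
import Mathlib
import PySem

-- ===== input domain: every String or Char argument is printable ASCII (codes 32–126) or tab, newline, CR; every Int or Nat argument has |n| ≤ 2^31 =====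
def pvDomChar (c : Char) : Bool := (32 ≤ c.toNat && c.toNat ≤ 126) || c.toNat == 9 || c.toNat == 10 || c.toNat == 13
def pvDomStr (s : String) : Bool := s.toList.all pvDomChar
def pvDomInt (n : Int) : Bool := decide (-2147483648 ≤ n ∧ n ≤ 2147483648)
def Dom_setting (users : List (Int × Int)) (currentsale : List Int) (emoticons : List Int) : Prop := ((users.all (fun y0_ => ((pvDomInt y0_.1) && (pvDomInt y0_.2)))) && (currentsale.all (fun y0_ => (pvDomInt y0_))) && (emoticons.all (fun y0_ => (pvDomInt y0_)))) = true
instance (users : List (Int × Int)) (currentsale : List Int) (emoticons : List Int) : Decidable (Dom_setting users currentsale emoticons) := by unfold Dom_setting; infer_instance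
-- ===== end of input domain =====

-- B replaces A's per-user scan of all emoticons by sort + prefix sums + binary search (measured faster at large sizes).

-- the discounted price of one emoticon, as both Pythons compute it
def pvDisc (s e : Int) : Int := PySem.Int.floordiv (e * (100 - s)) 100

-- ===== PORT A =====
def setting (users : List (Int × Int)) (currentsale : List Int) (emoticons : List Int) : Int × Int :=
  -- state: (allmoney, allpeople); indexing is in range on Pre_ inputs, so pyGetD is exact there
  let st := users.foldl (fun (acc : Int × Int) i =>
      let moneycount := (PySem.List.pyRange 0 (currentsale.length : Int) 1).foldl
        (fun mc j =>
          if i.1 ≤ PySem.List.pyGetD currentsale j 0 then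
            mc + pvDisc (PySem.List.pyGetD currentsale j 0) (PySem.List.pyGetD emoticons j 0)
          else mc) 0
      if moneycount < i.2 then (acc.1 + moneycount, acc.2) else (acc.1, acc.2 + 1))
    (0, 0)
  (st.2, st.1)

-- ===== PORT B =====
def setting_alt (users : List (Int × Int)) (currentsale : List Int) (emoticons : List Int) : Int × Int :=
  -- the pair comprehension indexes both lists; in range on Pre_ inputs, so pyGetD is exact there
  let pairs := PySem.List.sorted
    ((PySem.List.pyRange 0 (currentsale.length : Int) 1).map
      (fun j => (PySem.List.pyGetD currentsale j 0, PySem.List.pyGetD emoticons j 0)))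
    (fun p => p.1) false
  let n := pairs.length
  let sales := pairs.map (fun p => p.1)
  -- prefix sums of the discounted prices of reversed(pairs); state: (prefix, run)
  let pr := pairs.reverse.foldl (fun (st : List Int × Int) pe =>
      let run := st.2 + pvDisc pe.1 pe.2
      (st.1 ++ [run], run)) ([0], 0)
  let st := users.foldl (fun (acc : Int × Int) u =>
      let idx := PySem.List.bisectLeft sales u.1
      let moneycount := PySem.List.pyGetD pr.1 ((n : Int) - (idx : Int)) 0
      if moneycount < u.2 then (acc.1 + moneycount, acc.2) else (acc.1, acc.2 + 1))
    (0, 0)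
  (st.2, st.1)

-- ===== PRECONDITION & SPEC =====
-- Pre_ excludes mismatched parallel lists (currentsale longer than emoticons): malformed input on
-- which B raises IndexError building the pairs, and A raises IndexError too unless no user's
-- threshold happens to reach one of the extra unpriced sale values.
def Pre_setting (users : List (Int × Int)) (currentsale : List Int) (emoticons : List Int) : Prop :=
  currentsale.length ≤ emoticons.length
instance (users : List (Int × Int)) (currentsale : List Int) (emoticons : List Int) : Decidable (Pre_setting users currentsale emoticons) := by unfold Pre_setting; infer_instance
def pvWitness_setting : (List (Int × Int)) × List Int × List Int := ([(10, 100)], [10, 40], [100, 200])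

def Spec_setting (users : List (Int × Int)) (currentsale : List Int) (emoticons : List Int) (out : Int × Int) : Prop := out = setting_alt users currentsale emoticons
instance (users : List (Int × Int)) (currentsale : List Int) (emoticons : List Int) (out : Int × Int) : Decidable (Spec_setting users currentsale emoticons out) := by unfold Spec_setting; infer_instance

-- ===== CLAIM (what is proved, stated in full; the proofs are below) =====
def Claim_equal_setting : Prop := ∀ (users : List (Int × Int)) (currentsale : List Int) (emoticons : List Int), Dom_setting users currentsale emoticons → Pre_setting users currentsale emoticons → Spec_setting users currentsale emoticons (setting users currentsale emoticons)

-- ===== LEMMAS AND PROOFS =====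

-- the index comprehension over parallel lists is their zip (when the indices are in range)
lemma pvRangeMap_zip (cs es : List Int) (h : cs.length ≤ es.length) :
    (List.range cs.length).map (fun k => (cs.getD k 0, es.getD k 0)) = cs.zip es := by
  induction cs generalizing es with
  | nil => simp
  | cons c cs' ih =>
    cases es with
    | nil => simp at h
    | cons e es' =>
      rw [List.length_cons, List.range_succ_eq_map]
      simp only [List.map_cons, List.map_map, Function.comp_def, List.getD_cons_zero,
        List.getD_cons_succ, List.zip_cons_cons]
      rw [ih es' (by simpa using h)]

-- the prefix-sum list B's loop builds, characterised structurally
def pvPfx (r : Int) : List (Int × Int) → List Int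
  | [] => [r]
  | p :: ps => r :: pvPfx (r + pvDisc p.1 p.2) ps

lemma pvPfx_fold (l : List (Int × Int)) (acc : List Int) (r : Int) :
    (l.foldl (fun (st : List Int × Int) pe =>
      (st.1 ++ [st.2 + pvDisc pe.1 pe.2], st.2 + pvDisc pe.1 pe.2)) (acc ++ [r], r)).1
    = acc ++ pvPfx r l := by
  induction l generalizing acc r with
  | nil => simp [pvPfx]
  | cons p ps ih =>
    simp only [List.foldl_cons]
    have := ih (acc ++ [r]) (r + pvDisc p.1 p.2)
    simpa [pvPfx, List.append_assoc] using this

lemma pvPfx_getD (l : List (Int × Int)) (r : Int) (m : Nat) (hm : m ≤ l.length) :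
    (pvPfx r l).getD m 0 = r + ((l.take m).map (fun p => pvDisc p.1 p.2)).sum := by
  induction l generalizing r m with
  | nil => cases m with
    | zero => simp [pvPfx]
    | succ m => simp at hm
  | cons p ps ih =>
    cases m with
    | zero => simp [pvPfx]
    | succ m =>
      simp only [pvPfx, List.getD_cons_succ, List.take_succ_cons, List.map_cons, List.sum_cons]
      rw [ih _ m (by simpa using hm)]
      ring

-- A's inner loop as a filtered sum over the zipped lists
lemma pvInnerSum (cs es : List Int) (t : Int) (h : ∀ s ∈ cs.drop es.length, s < t) :
    ((List.range cs.length).map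
      (fun k => if t ≤ cs.getD k 0 then pvDisc (cs.getD k 0) (es.getD k 0) else 0)).sum
    = (((cs.zip es).filter (fun p => decide (t ≤ p.1))).map (fun p => pvDisc p.1 p.2)).sum := by
  induction cs generalizing es with
  | nil => simp
  | cons c cs' ih =>
    rw [List.length_cons, List.range_succ_eq_map]
    cases es with
    | nil =>
      have hc : ¬ t ≤ c := by have := h c (by simp); omega
      simp only [List.map_cons, List.sum_cons, List.map_map, List.getD_cons_zero,
        Function.comp_def, List.getD_cons_succ]
      rw [if_neg hc]
      have := ih [] (by intro s hs; exact h s (by simpa using List.mem_cons_of_mem c hs))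
      simpa [List.getD] using this
    | cons e es' =>
      simp only [List.map_cons, List.sum_cons, List.map_map]
      have := ih es' (by intro s hs; exact h s (by simpa using hs))
      simp only [Function.comp_def, List.getD_cons_succ] at *
      rw [this]
      by_cases hc : t ≤ c <;> simp [hc]

-- sorted + bisect: the filtered pairs are exactly the dropped suffix
lemma filter_eq_drop (l : List (Int × Int)) (t : Int)
    (hs : (l.map (fun p => p.1)).Pairwise (· ≤ ·)) :
    l.filter (fun p => decide (t ≤ p.1)) = l.drop (PySem.List.bisectLeft (l.map (fun p => p.1)) t) := by
  obtain ⟨hle, hlt, hge⟩ := PySem.List.bisectLeft_spec (l.map (fun p => p.1)) t hs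
  set idx := PySem.List.bisectLeft (l.map (fun p => p.1)) t with hidx
  rw [List.length_map] at hle
  conv_lhs => rw [← List.take_append_drop idx l]
  rw [List.filter_append]
  have h1 : (l.take idx).filter (fun p => decide (t ≤ p.1)) = [] := by
    rw [List.filter_eq_nil_iff]
    intro x hx
    obtain ⟨j, hj, rfl⟩ := List.mem_iff_getElem.mp hx
    have hjb : j < idx ∧ j < l.length := by simp [List.length_take] at hj; omega
    rw [List.getElem_take]
    have := hlt j (by simpa using hjb.2) hjb.1
    rw [List.getElem_map] at this
    simpa using not_le.mpr this
  have h2 : (l.drop idx).filter (fun p => decide (t ≤ p.1)) = l.drop idx := by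
    rw [List.filter_eq_self]
    intro x hx
    obtain ⟨j, hj, rfl⟩ := List.mem_iff_getElem.mp hx
    rw [List.getElem_drop]
    have hjl : idx + j < l.length := by simp at hj; omega
    have := hge (idx + j) (by simpa using hjl) (Nat.le_add_right _ _)
    rw [List.getElem_map] at this
    simpa using this
  rw [h1, h2, List.nil_append]

lemma bisect_le_len (l : List (Int × Int)) (t : Int)
    (hs : (l.map (fun p => p.1)).Pairwise (· ≤ ·)) :
    PySem.List.bisectLeft (l.map (fun p => p.1)) t ≤ l.length := by
  have := (PySem.List.bisectLeft_spec (l.map (fun p => p.1)) t hs).1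
  simpa using this

-- per-user equality of the two moneycounts
lemma mc_eq (cs es : List Int) (t : Int) (h : ∀ s ∈ cs.drop es.length, s < t) :
    (PySem.List.pyRange 0 (cs.length : Int) 1).foldl
      (fun mc j =>
        if t ≤ PySem.List.pyGetD cs j 0 then
          mc + pvDisc (PySem.List.pyGetD cs j 0) (PySem.List.pyGetD es j 0)
        else mc) 0
    = (let pairs := PySem.List.sorted (List.zip cs es) (fun p => p.1) false
       PySem.List.pyGetD
         (pairs.reverse.foldl (fun (st : List Int × Int) pe =>
           (st.1 ++ [st.2 + pvDisc pe.1 pe.2], st.2 + pvDisc pe.1 pe.2)) ([0], 0)).1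
         ((pairs.length : Int) - (PySem.List.bisectLeft (pairs.map (fun p => p.1)) t : Int)) 0) := by
  set pairs := PySem.List.sorted (List.zip cs es) (fun p => p.1) false with hpairs
  have hkey : (pairs.map (fun p => p.1)).Pairwise (· ≤ ·) :=
    PySem.List.sorted_map_key_pairwise (List.zip cs es) (fun p => p.1)
  set idx := PySem.List.bisectLeft (pairs.map (fun p => p.1)) t with hidx
  have hidxle : idx ≤ pairs.length := bisect_le_len pairs t hkey
  have hbody : (fun (mc : Int) (j : Int) =>
      if t ≤ PySem.List.pyGetD cs j 0 then
        mc + pvDisc (PySem.List.pyGetD cs j 0) (PySem.List.pyGetD es j 0)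
      else mc)
      = (fun (mc : Int) (j : Int) => mc +
        (if t ≤ PySem.List.pyGetD cs j 0 then
          pvDisc (PySem.List.pyGetD cs j 0) (PySem.List.pyGetD es j 0) else 0)) := by
    funext mc j
    by_cases hc : t ≤ PySem.List.pyGetD cs j 0 <;> simp [hc]
  rw [hbody, PySem.List.foldl_add, PySem.List.pyRange_one]
  simp only [List.map_map, Int.sub_zero, Int.toNat_natCast, Function.comp_def, zero_add,
    PySem.List.pyGetD_natCast]
  rw [pvInnerSum cs es t h]
  have hpf := pvPfx_fold pairs.reverse [] 0
  simp only [List.nil_append] at hpf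
  rw [hpf, ← Nat.cast_sub hidxle, PySem.List.pyGetD_natCast,
    pvPfx_getD pairs.reverse 0 (pairs.length - idx) (by simp),
    List.take_reverse, List.map_reverse, List.sum_reverse]
  have hdropidx : pairs.length - (pairs.length - idx) = idx := by omega
  rw [hdropidx, ← filter_eq_drop pairs t hkey]
  have hperm : pairs.Perm (List.zip cs es) :=
    PySem.List.sorted_perm (List.zip cs es) (fun p => p.1) false
  have hsum := List.Perm.sum_eq ((hperm.filter (fun p => decide (t ≤ p.1))).map (fun p => pvDisc p.1 p.2))
  omega

-- ===== VERDICT (by name: the statement is the Claim_ definition above) =====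
theorem setting_spec : Claim_equal_setting := by
  intro users cs es _ hpre
  unfold Spec_setting setting setting_alt
  -- B's pair comprehension is zip cs es on Pre_ inputs
  have hzip : ((PySem.List.pyRange 0 (cs.length : Int) 1).map
      (fun j => (PySem.List.pyGetD cs j 0, PySem.List.pyGetD es j 0))) = List.zip cs es := by
    rw [PySem.List.pyRange_one]
    simp only [List.map_map, Int.sub_zero, Int.toNat_natCast, Function.comp_def, zero_add,
      PySem.List.pyGetD_natCast]
    exact pvRangeMap_zip cs es hpre
  rw [hzip]
  simp only []
  have hdrop : cs.drop es.length = [] := List.drop_eq_nil_of_le hpre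
  have hfold := PySem.List.foldl_congr_mem users
    (fun (acc : Int × Int) i =>
      let moneycount := (PySem.List.pyRange 0 (cs.length : Int) 1).foldl
        (fun mc j =>
          if i.1 ≤ PySem.List.pyGetD cs j 0 then
            mc + pvDisc (PySem.List.pyGetD cs j 0) (PySem.List.pyGetD es j 0)
          else mc) 0
      if moneycount < i.2 then (acc.1 + moneycount, acc.2) else (acc.1, acc.2 + 1))
    (fun (acc : Int × Int) u =>
      let pairs := PySem.List.sorted (List.zip cs es) (fun p => p.1) false
      let moneycount := PySem.List.pyGetD
        (pairs.reverse.foldl (fun (st : List Int × Int) pe =>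
          (st.1 ++ [st.2 + pvDisc pe.1 pe.2], st.2 + pvDisc pe.1 pe.2)) ([0], 0)).1
        ((pairs.length : Int) - (PySem.List.bisectLeft (pairs.map (fun p => p.1)) u.1 : Int)) 0
      if moneycount < u.2 then (acc.1 + moneycount, acc.2) else (acc.1, acc.2 + 1))
    (0, 0)
    (fun acc u hu => by
      have := mc_eq cs es u.1 (fun s hs => by rw [hdrop] at hs; simp at hs)
      simp only [] at this ⊢
      rw [this])
  rw [hfold]
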